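-- pv_equiv track=rewrite | github.com/pengyang-Li/SOSA-CAD-caption | tools/gt_caption.py | find_semanticIndex
-- ===== SOURCE A (Python) =====
-- def find_semanticIndex(arr):
--     """
--         查找各个实例由哪些原语索引组成
--     """
--     semantic_index = {}
--     for index, value in enumerate(arr):
--         if value >=30 and value <=34:
--             if value not in semantic_index:
--                 semantic_index[value] = []
--             semantic_index[value].append(index)
--     return semantic_index
-- ===== SOURCE B (Python) =====
-- def find_semanticIndex(arr):
--     """
--         查找各个实例由哪些原语索引组成
--     """
--     # Two-phase group-by: first collect the distinct in-range values in
--     # first-occurrence order, then gather each value's indices with one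
--     # comprehension per value.
--     keys = []
--     for v in arr:
--         if 30 <= v <= 34 and v not in keys:
--             keys.append(v)
--     return {v: [i for i, x in enumerate(arr) if x == v] for v in keys}
-- ===== Notes on version B (the rewrite author's own statement) =====
-- stated objective: alternative
-- what changed: Replaces the single-pass dict-mutation dispatch with a two-phase group-by: one pass collects the distinct in-range values in first-occurrence order, then each value's index list is built by its own enumerate-comprehension scan, assembled in a dict comprehension.
import Mathlib
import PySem

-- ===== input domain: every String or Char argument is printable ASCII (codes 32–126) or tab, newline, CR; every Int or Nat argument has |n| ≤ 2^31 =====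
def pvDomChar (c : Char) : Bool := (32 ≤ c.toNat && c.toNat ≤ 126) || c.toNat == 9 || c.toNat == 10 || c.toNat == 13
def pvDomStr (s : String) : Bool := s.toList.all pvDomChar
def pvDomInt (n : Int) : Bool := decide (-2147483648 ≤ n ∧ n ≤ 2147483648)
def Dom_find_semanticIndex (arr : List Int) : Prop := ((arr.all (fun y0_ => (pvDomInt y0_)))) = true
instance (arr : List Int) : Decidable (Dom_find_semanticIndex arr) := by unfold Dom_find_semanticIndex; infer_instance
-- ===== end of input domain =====

-- B replaces A's single-pass dict mutation by a two-phase group-by (distinct keys first, then one index scan per key); same result, alternative structure.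

-- ===== PORT A =====
def find_semanticIndex (arr : List Int) : List (Int × List Int) :=
  ((PySem.List.enumerate arr).foldl (fun d p =>
      if 30 ≤ p.2 ∧ p.2 ≤ 34 then
        let d1 := if d.contains p.2 = false then d.insert p.2 [] else d
        d1.modify p.2 [] (fun l => l ++ [p.1])
      else d) PySem.Dict.empty).items

-- ===== PORT B =====
def find_semanticIndex_alt (arr : List Int) : List (Int × List Int) :=
  let keys := arr.foldl (fun ks v => if (30 ≤ v ∧ v ≤ 34) ∧ ¬ (v ∈ ks) then ks ++ [v] else ks) ([] : List Int)
  keys.map (fun v => (v, (PySem.List.enumerate arr).filterMap (fun p => if p.2 = v then some p.1 else none)))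

-- ===== PRECONDITION & SPEC =====
def Spec_find_semanticIndex (arr : List Int) (out : List (Int × List Int)) : Prop := out = find_semanticIndex_alt arr
instance (arr : List Int) (out : List (Int × List Int)) : Decidable (Spec_find_semanticIndex arr out) := by unfold Spec_find_semanticIndex; infer_instance

-- ===== CLAIM (what is proved, stated in full; the proofs are below) =====
def Claim_equal_find_semanticIndex : Prop := ∀ (arr : List Int), Dom_find_semanticIndex arr → Spec_find_semanticIndex arr (find_semanticIndex arr)

-- ===== LEMMAS AND PROOFS =====

-- the in-range predicate both programs use
def fsiInRange (v : Int) : Bool := decide (30 ≤ v ∧ v ≤ 34)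

-- Python's `if v not in d: d[v] = []` followed by `d[v].append(i)` is one `modify`
theorem fsi_step_eq_modify (d : PySem.Dict Int (List Int)) (k : Int) (f : List Int → List Int) :
    (if d.contains k = false then d.insert k [] else d).modify k [] f = d.modify k [] f := by
  by_cases h : d.contains k = false
  · simp only [h, if_pos, PySem.Dict.modify, PySem.Dict.getD_insert_self,
      PySem.Dict.insert_insert_self, PySem.Dict.getD_of_not_contains d [] h]
  · simp [h]

-- the values of the filtered enumeration are the filtered values
theorem fsi_filter_enum_snd (c : Int → Bool) (xs : List Int) (s : Int) :
    (((PySem.List.enumerate xs s).filter (fun p => c p.2)).map (·.2)) = xs.filter c := by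
  induction xs generalizing s with
  | nil => rfl
  | cons x t ih =>
    by_cases h : c x <;>
      simp [PySem.List.enumerate_cons, h, ih]

-- a comprehension [i for i, x in enumerate(arr) if x == v] as filter-then-map
theorem fsi_filterMap_eq (v : Int) (l : List (Int × Int)) :
    l.filterMap (fun p => if p.2 = v then some p.1 else none)
      = (l.filter (fun p => p.2 == v)).map (·.1) := by
  induction l with
  | nil => rfl
  | cons p t ih => by_cases h : p.2 = v <;> simp [h, ih]

-- characterisation of A: keys in first-occurrence order, each with its index list
theorem fsi_A_char (arr : List Int) :
    find_semanticIndex arr =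
      (PySem.Set.ofList (arr.filter fsiInRange)).map
        (fun v => (v, (((PySem.List.enumerate arr).filter (fun p => fsiInRange p.2)).filter
            (fun p => p.2 == v)).map (·.1))) := by
  unfold find_semanticIndex
  have hf : (fun (d : PySem.Dict Int (List Int)) (p : Int × Int) =>
        if 30 ≤ p.2 ∧ p.2 ≤ 34 then
          (if d.contains p.2 = false then d.insert p.2 [] else d).modify p.2 [] (fun l => l ++ [p.1])
        else d)
      = (fun d p => if fsiInRange p.2 = true then d.modify p.2 [] (fun l => l ++ [p.1]) else d) := by
    funext d p
    by_cases h : 30 ≤ p.2 ∧ p.2 ≤ 34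
    · simp [fsiInRange, h, fsi_step_eq_modify]
    · simp [fsiInRange, h]
  rw [hf, ← List.foldl_filter]
  set l := (PySem.List.enumerate arr).filter (fun p => fsiInRange p.2) with hl
  have hkeys : (l.foldl (fun d p => d.modify p.2 [] (fun x => x ++ [p.1])) PySem.Dict.empty).keys
      = PySem.Set.ofList (l.map (·.2)) := by
    rw [PySem.Dict.keys_foldl_modify_key l (·.2) [] (fun _ p => fun x => x ++ [p.1]) PySem.Dict.empty]
    simp [PySem.Dict.keys_empty, PySem.Set.update_nil_left]
  have hnodup : (l.foldl (fun d p => d.modify p.2 [] (fun x => x ++ [p.1])) PySem.Dict.empty).keys.Nodup := by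
    rw [hkeys]; exact PySem.Set.nodup_ofList _
  have hgetD : ∀ v : Int,
      (l.foldl (fun d p => d.modify p.2 [] (fun x => x ++ [p.1])) PySem.Dict.empty).getD v []
        = (l.filter (fun p => p.2 == v)).map (·.1) := by
    intro v
    have hswap : l.foldl (fun d p => d.modify p.2 [] (fun x => x ++ [p.1])) PySem.Dict.empty
        = ((l.map (fun p => (p.2, p.1))).foldl (fun d q => d.modify q.1 [] (fun x => x ++ [q.2]))
            PySem.Dict.empty) := by
      rw [List.foldl_map]
    rw [hswap, PySem.Dict.getD_foldl_modify_append, PySem.Dict.getD_empty, List.filter_map,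
      List.map_map]
    rfl
  rw [PySem.Dict.items_eq_map_keys _ hnodup [], hkeys]
  rw [fsi_filter_enum_snd fsiInRange arr 0]
  exact List.map_congr_left (fun v _ => by rw [hgetD v])

-- characterisation of B's key list: the distinct in-range values, in order
theorem fsi_B_keys (arr : List Int) :
    arr.foldl (fun ks v => if (30 ≤ v ∧ v ≤ 34) ∧ ¬ (v ∈ ks) then ks ++ [v] else ks) ([] : List Int)
      = PySem.Set.ofList (arr.filter fsiInRange) := by
  have hf : (fun (ks : List Int) (v : Int) => if (30 ≤ v ∧ v ≤ 34) ∧ ¬ (v ∈ ks) then ks ++ [v] else ks)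
      = (fun ks v => if fsiInRange v = true then PySem.Set.add ks v else ks) := by
    funext ks v
    by_cases h : 30 ≤ v ∧ v ≤ 34
    · by_cases hm : v ∈ ks <;>
        simp [fsiInRange, h, hm]
    · simp [fsiInRange, h]
  rw [hf, ← List.foldl_filter, PySem.Set.ofList_eq_foldl]

-- ===== VERDICT (by name: the statement is the Claim_ definition above) =====
theorem find_semanticIndex_spec : Claim_equal_find_semanticIndex := by
  intro arr _
  unfold Spec_find_semanticIndex find_semanticIndex_alt
  rw [fsi_A_char, fsi_B_keys]
  refine List.map_congr_left (fun v hv => ?_)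
  have hvr : fsiInRange v = true := by
    have := (PySem.Set.mem_ofList (xs := arr.filter fsiInRange) (y := v)).1 hv
    exact (List.mem_filter.1 this).2
  rw [fsi_filterMap_eq v (PySem.List.enumerate arr), List.filter_filter]
  refine congrArg _ (congrArg _ (List.filter_congr (fun p _ => ?_)))
  by_cases h : p.2 = v
  · simp [h, hvr]
  · simp [h]
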